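-- pv_equiv track=rewrite | github.com/daalgi/algorithms | stacks/valid_parenthesis_string.py | greedy2
-- ===== SOURCE A (Python) =====
-- def greedy2(s: str) -> bool:
--
--     # Basic case
--     if s[0] == ")" or s[-1] == "(":
--         return False
--
--     # Balance min, balance max refer to the not yet closed
--     # parentheses count.
--     # bmin: minimum number of closing parentheses
--     # bmax: maximum number of open parentheses
--     bmin, bmax = 0, 0
--     # Loop over the characters of the string
--     for c in s:
--         if c == "(":
--             # Open parentheses
--             bmax += 1
--             bmin += 1
--         elif c == ")":
--             # Closing parentheses
--             bmax -= 1
--             bmin -= 1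
--         else:
--             # If "*", we can open a parenthesis or close it
--             bmax += 1
--             bmin -= 1
--
--         if bmax < 0:
--             # Not enough open parentheses to match closeing parentheses
--             return False
--
--         # Limit the number of closing parentheses.
--         # If there are enough "*", we'll ignore the "*" not needed
--         bmin = max(bmin, 0)
--
--     # At the end, if the closing parentheses are balanced out,
--     # is valid
--     return bmin == 0
-- ===== SOURCE B (Python) =====
-- def greedy2(s: str) -> bool:
--     # Two independent counter passes instead of A's coupled (bmin, bmax) scan:
--     # forward pass treats every non-')' as an opener, backward pass treats every
--     # non-'(' as a closer; valid iff neither balance ever goes past zero.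
--     bal = 0
--     for c in s:
--         bal += -1 if c == ")" else 1
--         if bal < 0:
--             return False
--     bal = 0
--     for c in reversed(s):
--         bal += 1 if c == "(" else -1
--         if bal > 0:
--             return False
--     return True
-- ===== Notes on version B (the rewrite author's own statement) =====
-- stated objective: simpler
-- what changed: Replaces A's single scan that maintains the coupled clamped counter pair (bmin, bmax) by two independent one-counter passes — a forward pass counting every non-closing character as an opener and a pass over the reversed string counting every non-opening character as a closer — each failing as soon as its balance crosses zero; one counter update per character and no clamping.
import Mathlib
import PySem

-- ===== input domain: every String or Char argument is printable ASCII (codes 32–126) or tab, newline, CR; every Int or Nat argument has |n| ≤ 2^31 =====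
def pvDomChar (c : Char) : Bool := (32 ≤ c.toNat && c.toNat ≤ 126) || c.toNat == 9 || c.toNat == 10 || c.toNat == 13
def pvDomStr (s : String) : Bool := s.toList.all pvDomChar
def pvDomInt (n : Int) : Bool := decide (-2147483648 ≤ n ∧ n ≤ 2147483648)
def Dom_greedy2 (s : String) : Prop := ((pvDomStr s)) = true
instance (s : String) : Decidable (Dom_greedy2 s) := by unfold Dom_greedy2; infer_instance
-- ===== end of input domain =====

-- B replaces A's single coupled (bmin, bmax) scan by two independent one-counter passes
-- (forward and over the reversed string); objective: simpler, same O(n) cost.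

-- ===== PORT A =====
-- A's for-loop: state (bmin, bmax), early `return False` when bmax < 0, clamp bmin at 0
def greedy2Loop : List Char → Int → Int → Bool
  | [], bmin, _ => bmin == 0
  | c :: cs, bmin, bmax =>
    let st : Int × Int :=
      if c = '(' then (bmin + 1, bmax + 1)
      else if c = ')' then (bmin - 1, bmax - 1)
      else (bmin - 1, bmax + 1)
    if st.2 < 0 then false
    else greedy2Loop cs (max st.1 0) st.2

def greedy2 (s : String) : Bool :=
  -- s[0] / s[-1]: pyGet? is none exactly where Python raises IndexError (s = "", excluded by Pre_)
  match PySem.List.pyGet? s.toList 0, PySem.List.pyGet? s.toList (-1) with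
  | some c0, some cl =>
      if c0 = ')' ∨ cl = '(' then false
      else greedy2Loop s.toList 0 0
  | _, _ => false

-- ===== PORT B =====
-- forward pass: every non-')' counts +1, early False when the balance drops below 0
def altFwd : List Char → Int → Bool
  | [], _ => true
  | c :: cs, bal =>
    let bal' := if c = ')' then bal - 1 else bal + 1
    if bal' < 0 then false else altFwd cs bal'

-- backward pass (on the reversed list): '(' counts +1, early False when the balance rises above 0
def altBwd : List Char → Int → Bool
  | [], _ => true
  | c :: cs, bal =>
    let bal' := if c = '(' then bal + 1 else bal - 1
    if 0 < bal' then false else altBwd cs bal'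

def greedy2_alt (s : String) : Bool :=
  altFwd s.toList 0 && altBwd s.toList.reverse 0

-- ===== PRECONDITION & SPEC =====
-- Pre_ excludes only the empty string, on which A raises IndexError at s[0].
def Pre_greedy2 (s : String) : Prop := s.toList ≠ []
instance (s : String) : Decidable (Pre_greedy2 s) := by unfold Pre_greedy2; infer_instance
def pvWitness_greedy2 : String := "()"

def Spec_greedy2 (s : String) (out : Bool) : Prop := out = greedy2_alt s
instance (s : String) (out : Bool) : Decidable (Spec_greedy2 s out) := by unfold Spec_greedy2; infer_instance

-- ===== CLAIM (what is proved, stated in full; the proofs are below) =====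
def Claim_equal_greedy2 : Prop := ∀ (s : String), Dom_greedy2 s → Pre_greedy2 s → Spec_greedy2 s (greedy2 s)

-- ===== LEMMAS AND PROOFS =====

-- character weight shared by A's bmin and B's backward pass
def pvV (c : Char) : Int := if c = '(' then 1 else -1

def pvSum (l : List Char) : Int := (l.map pvV).sum

-- A's clamped bmin accumulator, isolated
def pvCf : List Char → Int → Int
  | [], b => b
  | c :: cs, b => pvCf cs (max (b + pvV c) 0)

lemma pvSum_cons (c : Char) (cs : List Char) : pvSum (c :: cs) = pvV c + pvSum cs := by
  simp [pvSum]

lemma pvSum_reverse (l : List Char) : pvSum l.reverse = pvSum l := by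
  simp [pvSum]

-- A's loop factors into B's forward pass and the clamped bmin fold
lemma loop_eq (cs : List Char) : ∀ bmin bmax : Int,
    greedy2Loop cs bmin bmax = (altFwd cs bmax && (pvCf cs bmin == 0)) := by
  induction cs with
  | nil => intro bmin bmax; simp [greedy2Loop, altFwd, pvCf]
  | cons c cs ih =>
    intro bmin bmax
    rcases eq_or_ne c '(' with h1 | h1
    · subst h1
      have e1 : greedy2Loop ('(' :: cs) bmin bmax
          = if bmax + 1 < 0 then false else greedy2Loop cs (max (bmin + 1) 0) (bmax + 1) := by
        simp [greedy2Loop]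
      have e2 : altFwd ('(' :: cs) bmax
          = if bmax + 1 < 0 then false else altFwd cs (bmax + 1) := by
        simp [altFwd]
      have e3 : pvCf ('(' :: cs) bmin = pvCf cs (max (bmin + 1) 0) := by
        simp [pvCf, pvV]
      rw [e1, e2, e3]
      split_ifs with h
      · simp
      · exact ih _ _
    · rcases eq_or_ne c ')' with h2 | h2
      · subst h2
        have e1 : greedy2Loop (')' :: cs) bmin bmax
            = if bmax - 1 < 0 then false else greedy2Loop cs (max (bmin - 1) 0) (bmax - 1) := by
          simp [greedy2Loop]
        have e2 : altFwd (')' :: cs) bmax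
            = if bmax - 1 < 0 then false else altFwd cs (bmax - 1) := by
          simp [altFwd]
        have e3 : pvCf (')' :: cs) bmin = pvCf cs (max (bmin - 1) 0) := by
          simp [pvCf, pvV, show bmin + -1 = bmin - 1 from by ring]
        rw [e1, e2, e3]
        split_ifs with h
        · simp
        · exact ih _ _
      · have e1 : greedy2Loop (c :: cs) bmin bmax
            = if bmax + 1 < 0 then false else greedy2Loop cs (max (bmin - 1) 0) (bmax + 1) := by
          simp [greedy2Loop, h1, h2]
        have e2 : altFwd (c :: cs) bmax
            = if bmax + 1 < 0 then false else altFwd cs (bmax + 1) := by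
          simp [altFwd, h2]
        have e3 : pvCf (c :: cs) bmin = pvCf cs (max (bmin - 1) 0) := by
          simp [pvCf, pvV, h1, show bmin + -1 = bmin - 1 from by ring]
        rw [e1, e2, e3]
        split_ifs with h
        · simp
        · exact ih _ _

lemma self_mem_tails (l : List Char) : l ∈ l.tails :=
  (List.mem_tails _ _).mpr (List.suffix_refl _)

-- the clamped fold ends at 0 iff every suffix sum is ≤ 0 (and b is absorbed)
lemma pvCf_eq_zero (cs : List Char) : ∀ b : Int, 0 ≤ b →
    (pvCf cs b = 0 ↔ (b + pvSum cs ≤ 0 ∧ ∀ t ∈ cs.tails, pvSum t ≤ 0)) := by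
  induction cs with
  | nil =>
    intro b hb
    simp [pvCf, pvSum]
    omega
  | cons c cs ih =>
    intro b hb
    have hm3 := max_choice (b + pvV c) 0
    have hm2 : (0:Int) ≤ max (b + pvV c) 0 := le_max_right _ _
    rw [show pvCf (c :: cs) b = pvCf cs (max (b + pvV c) 0) from rfl]
    rw [ih _ hm2]
    simp only [List.tails_cons, List.mem_cons, pvSum_cons]
    constructor
    · rintro ⟨h1, h2⟩
      have hcs : pvSum cs ≤ 0 := h2 cs (self_mem_tails cs)
      refine ⟨by rcases hm3 with hm | hm <;> omega, ?_⟩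
      rintro t (rfl | ht)
      · rw [pvSum_cons]; rcases hm3 with hm | hm <;> omega
      · exact h2 t ht
    · rintro ⟨h1, h2⟩
      have hcs : pvSum cs ≤ 0 := h2 cs (Or.inr (self_mem_tails cs))
      refine ⟨by rcases hm3 with hm | hm <;> omega, ?_⟩
      intro t ht
      exact h2 t (Or.inr ht)

-- B's backward pass checked against all nonempty prefixes
lemma altBwd_spec (l : List Char) : ∀ b : Int,
    (altBwd l b = true ↔ ∀ p ∈ l.inits, p ≠ [] → b + pvSum p ≤ 0) := by
  induction l with
  | nil => intro b; simp [altBwd]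
  | cons c cs ih =>
    intro b
    have hupd : (if c = '(' then b + 1 else b - 1) = b + pvV c := by
      unfold pvV; split_ifs <;> ring
    rw [show altBwd (c :: cs) b
        = (if 0 < (if c = '(' then b + 1 else b - 1) then false
           else altBwd cs (if c = '(' then b + 1 else b - 1)) from rfl]
    rw [hupd]
    simp only [List.inits_cons, List.mem_cons, List.mem_map]
    by_cases h : 0 < b + pvV c
    · rw [if_pos h]
      simp only [Bool.false_eq_true, false_iff, not_forall]
      refine ⟨[c], ⟨Or.inr ⟨[], by simp⟩, by simp, ?_⟩⟩
      rw [show pvSum [c] = pvV c from by simp [pvSum]]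
      omega
    · rw [if_neg h, ih]
      constructor
      · rintro hq p (rfl | ⟨q, hq', rfl⟩) hne
        · exact absurd rfl hne
        · rw [pvSum_cons]
          by_cases hq0 : q = []
          · subst hq0
            have h0 : pvSum ([] : List Char) = 0 := by simp [pvSum]
            omega
          · have := hq q hq' hq0; omega
      · intro hp q hq' hq0
        have := hp (c :: q) (Or.inr ⟨q, hq', rfl⟩) (by simp)
        rw [pvSum_cons] at this; omega

-- backward pass over the reversal ⇔ all suffix sums ≤ 0
lemma bwd_rev (cs : List Char) :
    (altBwd cs.reverse 0 = true) ↔ (∀ t ∈ cs.tails, pvSum t ≤ 0) := by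
  rw [altBwd_spec]
  constructor
  · intro h t ht
    by_cases h0 : t = []
    · simp [h0, pvSum]
    · have hm : t.reverse ∈ cs.reverse.inits := by
        rw [List.inits_reverse]
        simp only [List.mem_reverse, List.mem_map]
        exact ⟨t, ht, rfl⟩
      have := h t.reverse hm (by simpa using h0)
      rw [pvSum_reverse] at this; omega
  · intro h p hp hne
    rw [List.inits_reverse] at hp
    simp only [List.mem_reverse, List.mem_map] at hp
    obtain ⟨t, ht, rfl⟩ := hp
    rw [pvSum_reverse]
    have := h t ht; omega

-- the bmin side of A equals B's backward pass
lemma cf_zero_iff_bwd (cs : List Char) : ((pvCf cs 0 == 0) : Bool) = altBwd cs.reverse 0 := by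
  rw [Bool.eq_iff_iff, beq_iff_eq, pvCf_eq_zero cs 0 le_rfl, bwd_rev]
  constructor
  · rintro ⟨_, h⟩; exact h
  · intro h; exact ⟨by simpa using h cs (self_mem_tails cs), h⟩

-- ===== VERDICT (by name: the statement is the Claim_ definition above) =====
theorem greedy2_spec : Claim_equal_greedy2 := by
  unfold Claim_equal_greedy2
  intro s _ hpre
  unfold Spec_greedy2
  unfold Pre_greedy2 at hpre
  obtain ⟨c0, rest, hcs⟩ := List.exists_cons_of_ne_nil hpre
  obtain ⟨ys, cl, hconcat⟩ := List.eq_nil_or_concat s.toList |>.resolve_left hpre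
  have h0 : PySem.List.pyGet? s.toList 0 = some c0 := by
    rw [hcs]; simp [PySem.List.pyGet?, PySem.List.pyIdx?]
  have h1 : PySem.List.pyGet? s.toList (-1) = some cl := by
    rw [PySem.List.pyGet?_neg_one, hconcat]; simp
  unfold greedy2 greedy2_alt
  rw [h0, h1]
  show (if c0 = ')' ∨ cl = '(' then false else greedy2Loop s.toList 0 0)
      = (altFwd s.toList 0 && altBwd s.toList.reverse 0)
  by_cases hg : c0 = ')' ∨ cl = '('
  · rw [if_pos hg]
    rcases hg with h | h
    · have : altFwd s.toList 0 = false := by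
        rw [hcs, h]
        simp [altFwd]
      rw [this, Bool.false_and]
    · have : altBwd s.toList.reverse 0 = false := by
        rw [hconcat, h]
        simp [altBwd]
      rw [this, Bool.and_false]
  · rw [if_neg hg, loop_eq, cf_zero_iff_bwd]
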